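-- pv_equiv track=rewrite | github.com/faded-indigo/metadatawiz | core/rules.py | tokenize_for_natural_sort
-- ===== SOURCE A (Python) =====
-- from typing import List, Tuple, Optional, Iterable
--
-- def _is_ascii_digit(ch: str) -> bool:
--     """Return True if ch is in '0'..'9' (avoid non-ASCII numerals)."""
--     return '0' <= ch <= '9'
--
-- def tokenize_for_natural_sort(text: str) -> List[Tuple[bool, str]]:
--     """
--     Tokenize a string into alternating ASCII digit and non-digit runs.
--     Returns list of (is_digit, token) tuples.
--
--     Example: "abc123def45" -> [(False, "abc"), (True, "123"), (False, "def"), (True, "45")]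
--     """
--     if not text:
--         return []
--
--     tokens: List[Tuple[bool, str]] = []
--     current: List[str] = []
--     is_digit = _is_ascii_digit(text[0])
--
--     for char in text:
--         if _is_ascii_digit(char) == is_digit:
--             current.append(char)
--         else:
--             tokens.append((is_digit, ''.join(current)))
--             current = [char]
--             is_digit = not is_digit
--
--     if current:
--         tokens.append((is_digit, ''.join(current)))
--
--     return tokens
-- ===== SOURCE B (Python) =====
-- from typing import List, Tuple
--
--
-- def _span(pred, s: str) -> Tuple[str, str]:
--     """Longest prefix of s whose chars satisfy pred, and the rest."""
--     i = 0
--     while i < len(s) and pred(s[i]):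
--         i += 1
--     return s[:i], s[i:]
--
--
-- def tokenize_for_natural_sort(text: str) -> List[Tuple[bool, str]]:
--     out: List[Tuple[bool, str]] = []
--     rest = text
--     while rest:
--         d = '0' <= rest[0] <= '9'
--         run, rest = _span(lambda c: ('0' <= c <= '9') == d, rest)
--         out.append((d, run))
--     return out
-- ===== Notes on version B (the rewrite author's own statement) =====
-- stated objective: alternative
-- what changed: B extracts maximal digit/non-digit runs directly by repeated longest-prefix slicing (a span/two-pointer scan), instead of A's per-character accumulator loop that toggles an is_digit flag and joins a char list at each boundary.
import Mathlib
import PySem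

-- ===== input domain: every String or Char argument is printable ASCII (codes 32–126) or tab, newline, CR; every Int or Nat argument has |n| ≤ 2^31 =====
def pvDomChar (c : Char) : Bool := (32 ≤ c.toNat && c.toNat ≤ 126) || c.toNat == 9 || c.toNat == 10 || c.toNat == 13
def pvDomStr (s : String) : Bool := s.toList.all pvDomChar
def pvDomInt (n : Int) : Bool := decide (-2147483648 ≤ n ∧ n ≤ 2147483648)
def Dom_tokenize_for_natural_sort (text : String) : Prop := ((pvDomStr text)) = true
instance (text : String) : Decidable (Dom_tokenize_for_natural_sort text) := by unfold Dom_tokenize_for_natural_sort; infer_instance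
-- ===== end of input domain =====

-- B replaces A's per-character accumulator/flag loop with repeated longest-prefix (span) run extraction; alternative structure, same O(n) cost.


-- ===== PORT A =====
-- _is_ascii_digit: '0' <= ch <= '9'
def pvIsDig (c : Char) : Bool := decide ('0' ≤ c) && decide (c ≤ '9')

-- one loop iteration of A over state (tokens, current, is_digit)
def pvStepA (st : List (Bool × String) × List Char × Bool) (char : Char) :
    List (Bool × String) × List Char × Bool :=
  let (tokens, current, isd) := st
  if pvIsDig char == isd then (tokens, current ++ [char], isd)
  else (tokens ++ [(isd, String.mk current)], [char], !isd)

def tokenize_for_natural_sort (text : String) : List (Bool × String) :=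
  match text.toList with
  | [] => []
  | c :: _ =>
    let (tokens, current, isd) := text.toList.foldl pvStepA ([], [], pvIsDig c)
    if current ≠ [] then tokens ++ [(isd, String.mk current)] else tokens

-- ===== PORT B =====
-- _span: longest prefix satisfying pred, and the rest (hand recursion over the chars)
def pvSpan (p : Char → Bool) : List Char → List Char × List Char
  | [] => ([], [])
  | c :: rest =>
    if p c then
      let (a, b) := pvSpan p rest
      (c :: a, b)
    else ([], c :: rest)

theorem pvSpan_snd_length (p : Char → Bool) (l : List Char) :
    (pvSpan p l).2.length ≤ l.length := by
  induction l with
  | nil => simp [pvSpan]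
  | cons c rest ih =>
    simp only [pvSpan]
    split
    · simpa using Nat.le_succ_of_le ih
    · simp

-- B's while loop: peel one maximal run per iteration
def pvTokLoop (out : List (Bool × String)) (rest : List Char) : List (Bool × String) :=
  match rest with
  | [] => out
  | c :: tl =>
    let d := pvIsDig c
    pvTokLoop (out ++ [(d, String.mk (pvSpan (fun x => pvIsDig x == d) (c :: tl)).1)])
      (pvSpan (fun x => pvIsDig x == d) (c :: tl)).2
termination_by rest.length
decreasing_by
  simp only [pvSpan, show pvIsDig c == pvIsDig c from by simp, if_pos]
  exact Nat.lt_succ_of_le (pvSpan_snd_length _ tl)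

def tokenize_for_natural_sort_alt (text : String) : List (Bool × String) :=
  pvTokLoop [] text.toList

-- ===== PRECONDITION & SPEC =====
def Spec_tokenize_for_natural_sort (text : String) (out : List (Bool × String)) : Prop := out = tokenize_for_natural_sort_alt text
instance (text : String) (out : List (Bool × String)) : Decidable (Spec_tokenize_for_natural_sort text out) := by unfold Spec_tokenize_for_natural_sort; infer_instance

-- ===== CLAIM (what is proved, stated in full; the proofs are below) =====
def Claim_equal_tokenize_for_natural_sort : Prop := ∀ (text : String), Dom_tokenize_for_natural_sort text → Spec_tokenize_for_natural_sort text (tokenize_for_natural_sort text)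

-- ===== LEMMAS AND PROOFS =====

-- span over a run followed by [] or a mismatching head splits exactly there
theorem pvSpan_run (p : Char → Bool) (cur l : List Char)
    (hcur : ∀ x ∈ cur, p x = true)
    (hl : ∀ hd tl, l = hd :: tl → p hd = false) :
    pvSpan p (cur ++ l) = (cur, l) := by
  induction cur with
  | nil =>
    cases l with
    | nil => simp [pvSpan]
    | cons hd tl => simp [pvSpan, hl hd tl rfl]
  | cons c cur' ih =>
    have hc : p c = true := hcur c (by simp)
    have := ih (fun x hx => hcur x (by simp [hx]))
    simp [pvSpan, hc, this]

-- A's finalize step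
def pvFin (st : List (Bool × String) × List Char × Bool) : List (Bool × String) :=
  let (tokens, current, isd) := st
  if current ≠ [] then tokens ++ [(isd, String.mk current)] else tokens

-- loop invariant: A's remaining fold (with a nonempty homogeneous current run)
-- equals B's run loop on current ++ remaining input
theorem pvLoop_eq (l : List Char) : ∀ (toks : List (Bool × String)) (cur : List Char) (isd : Bool),
    cur ≠ [] → (∀ x ∈ cur, pvIsDig x = isd) →
    pvFin (List.foldl pvStepA (toks, cur, isd) l) = pvTokLoop toks (cur ++ l) := by
  induction l with
  | nil =>
    intro toks cur isd hne hcur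
    obtain ⟨c, cur', rfl⟩ : ∃ c cur', cur = c :: cur' := by
      cases cur with
      | nil => exact absurd rfl hne
      | cons c cur' => exact ⟨c, cur', rfl⟩
    have hd : pvIsDig c = isd := hcur c (by simp)
    have hspan : pvSpan (fun x => pvIsDig x == pvIsDig c) ((c :: cur') ++ []) = (c :: cur', []) :=
      pvSpan_run _ _ _ (fun x hx => by simp [hcur x (by simpa using hx), hd]) (by simp)
    rw [List.append_nil] at hspan
    rw [List.append_nil, List.foldl_nil]
    conv_rhs => rw [pvTokLoop.eq_def]
    simp only [hspan, pvFin]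
    conv_rhs => rw [pvTokLoop.eq_def]
    simp [hd]
  | cons a l' ih =>
    intro toks cur isd hne hcur
    by_cases hmatch : pvIsDig a = isd
    · have hstep : pvStepA (toks, cur, isd) a = (toks, cur ++ [a], isd) := by
        simp [pvStepA, hmatch]
      rw [List.foldl_cons, hstep,
        ih toks (cur ++ [a]) isd (by simp)
          (fun x hx => by rcases List.mem_append.1 hx with h | h
                          · exact hcur x h
                          · simp at h; simp [h, hmatch]),
        List.append_assoc]
      simp
    · obtain ⟨c, cur', rfl⟩ : ∃ c cur', cur = c :: cur' := by
        cases cur with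
        | nil => exact absurd rfl hne
        | cons c cur' => exact ⟨c, cur', rfl⟩
      have hd : pvIsDig c = isd := hcur c (by simp)
      have hstep : pvStepA (toks, c :: cur', isd) a =
          (toks ++ [(isd, String.mk (c :: cur'))], [a], !isd) := by
        simp [pvStepA, hmatch]
      have hspan : pvSpan (fun x => pvIsDig x == pvIsDig c) ((c :: cur') ++ (a :: l')) =
          (c :: cur', a :: l') :=
        pvSpan_run _ _ _ (fun x hx => by simp [hcur x (by simpa using hx), hd])
          (by intro hd' tl' hh
              cases hh
              rw [hd]
              exact beq_eq_false_iff_ne.mpr hmatch)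
      have hnot : pvIsDig a = !isd := by
        cases hia : pvIsDig a <;> cases hisd : isd <;> simp_all
      rw [List.foldl_cons, hstep,
        ih (toks ++ [(isd, String.mk (c :: cur'))]) [a] (!isd) (by simp)
          (by intro x hx; simp at hx; simp [hx, hnot])]
      conv_rhs => rw [pvTokLoop.eq_def]
      simp only [List.cons_append] at hspan ⊢
      rw [hspan]
      simp [hd]

-- ===== VERDICT (by name: the statement is the Claim_ definition above) =====
theorem tokenize_for_natural_sort_spec : Claim_equal_tokenize_for_natural_sort := by
  intro text _
  unfold Spec_tokenize_for_natural_sort tokenize_for_natural_sort tokenize_for_natural_sort_alt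
  cases h : text.toList with
  | nil => simp [pvTokLoop]
  | cons c tl =>
    have hfirst : pvStepA (([] : List (Bool × String)), ([] : List Char), pvIsDig c) c =
        ([], [c], pvIsDig c) := by simp [pvStepA]
    have := pvLoop_eq tl [] [c] (pvIsDig c) (by simp) (by intro x hx; simp at hx; simp [hx])
    simp only [List.foldl_cons, hfirst] at *
    simp [pvFin] at this
    simpa [ne_eq, ite_not] using this
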